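-- pv_equiv track=rewrite | github.com/Damian342/chesspy | chesspy.py | generate_thermometer
-- ===== SOURCE A (Python) =====
-- def generate_thermometer(cp: int, cp_range: int = 300, length: int = 15) -> str:
--     """
--     Prosta wizualizacja 'termometru' (ASCII) dla oceny w centipunktach.
--     """
--     cp = max(-cp_range, min(cp, cp_range))
--     center = length // 2
--     offset = int(round((cp / cp_range) * center))
--     marker = center + offset
--     bar = ""
--     for i in range(length):
--         bar += "█" if i == marker else "-"
--     return "[" + bar + "]"
-- ===== SOURCE B (Python) =====
-- def generate_thermometer(cp: int, cp_range: int = 300, length: int = 15) -> str: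
--     """Same thermometer, built from string segments instead of a per-index loop."""
--     cp = max(-cp_range, min(cp, cp_range))
--     center = length // 2
--     offset = int(round((cp / cp_range) * center))
--     marker = center + offset
--     if 0 <= marker < length:
--         return "[" + "-" * marker + "\u2588" + "-" * (length - marker - 1) + "]"
--     return "[" + "-" * length + "]"
-- ===== Notes on version B (the rewrite author's own statement) =====
-- stated objective: simpler
-- what changed: B keeps the identical clamp/center/offset/marker computation but builds the bar directly from three string segments ('-'*marker + '█' + '-'*(length-marker-1), or all dashes when the marker falls outside the bar) instead of A's per-index loop comparing every position with the marker; the bulk repetitions remove the per-character Python-level work.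
-- outside the precondition, e.g. on generate_thermometer(1, 0, 15): A raises ZeroDivisionError, B raises ZeroDivisionError
import Mathlib
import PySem

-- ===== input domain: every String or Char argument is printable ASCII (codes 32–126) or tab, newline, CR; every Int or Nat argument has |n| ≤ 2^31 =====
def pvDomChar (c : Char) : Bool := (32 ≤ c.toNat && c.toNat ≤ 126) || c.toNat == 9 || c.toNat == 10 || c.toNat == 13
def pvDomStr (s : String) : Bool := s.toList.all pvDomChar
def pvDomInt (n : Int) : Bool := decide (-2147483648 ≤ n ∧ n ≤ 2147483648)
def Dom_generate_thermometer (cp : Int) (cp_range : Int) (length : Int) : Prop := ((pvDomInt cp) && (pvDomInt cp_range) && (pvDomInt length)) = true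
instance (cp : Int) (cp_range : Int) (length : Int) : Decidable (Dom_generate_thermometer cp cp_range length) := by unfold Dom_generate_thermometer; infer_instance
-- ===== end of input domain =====

-- B builds the thermometer bar from three bulk string segments instead of A's per-index loop (objective: simpler).
-- The shared line `int(round((cp / cp_range) * center))` uses IEEE-double division; both ports compute it by exact
-- rational round-half-to-even, which is what Python returns on every input admitted by Pre_ (float half-ties excluded).

-- ===== PORT A =====
-- shared helper: round(a / b) with Python's round-half-to-even, on exact rationals (b ≠ 0;
-- exact w.r.t. Python's float computation on all inputs admitted by Pre_ below)
def pvRoundDiv (a b : Int) : Int :=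
  let a' := if b < 0 then -a else a
  let b' := if b < 0 then -b else b
  let n := Int.fdiv a' b'
  let r := a' - n * b'
  if 2 * r < b' then n else if b' < 2 * r then n + 1 else if n % 2 = 0 then n else n + 1

def generate_thermometer (cp : Int) (cp_range : Int) (length : Int) : String :=
  let cp2 := max (-cp_range) (min cp cp_range)
  let center := PySem.Int.floordiv length 2
  let offset := pvRoundDiv (cp2 * center) cp_range  -- int(round((cp / cp_range) * center)), exact on Pre_
  let marker := center + offset
  let bar := (PySem.List.pyRange 0 length 1).foldl
    (fun b i => b ++ (if i = marker then "█" else "-")) ""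
  "[" ++ bar ++ "]"

-- ===== PORT B =====
def generate_thermometer_alt (cp : Int) (cp_range : Int) (length : Int) : String :=
  let cp2 := max (-cp_range) (min cp cp_range)
  let center := PySem.Int.floordiv length 2
  let offset := pvRoundDiv (cp2 * center) cp_range  -- same shared line as in A (and in Source B)
  let marker := center + offset
  if 0 ≤ marker ∧ marker < length then
    "[" ++ String.ofList (List.replicate marker.toNat '-') ++ "█"
        ++ String.ofList (List.replicate (length - marker - 1).toNat '-') ++ "]"
  else
    "[" ++ String.ofList (List.replicate length.toNat '-') ++ "]"

-- ===== PRECONDITION & SPEC =====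
-- Pre_ excludes cp_range = 0, where A raises ZeroDivisionError, and the inputs where the exact value
-- (clamped cp)·center/cp_range lies within relative distance 2^-50 of a half-integer: there A's value is an
-- artefact of IEEE-double rounding (Python B returns the same value as A, but neither is representable by the
-- ports' exact rational round-half-to-even).
def Pre_generate_thermometer (cp : Int) (cp_range : Int) (length : Int) : Prop :=
  cp_range ≠ 0 ∧
  (let cp2 := max (-cp_range) (min cp cp_range)
   let n := 2 * PySem.Int.floordiv length 2 * cp2
   let q := |cp_range|
   let d := |n % (2 * q) - q|
   |n| < d * 1125899906842624)
instance (cp : Int) (cp_range : Int) (length : Int) : Decidable (Pre_generate_thermometer cp cp_range length) := by unfold Pre_generate_thermometer; infer_instance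

def pvWitness_generate_thermometer : Int × Int × Int := (120, 300, 15)

def Spec_generate_thermometer (cp : Int) (cp_range : Int) (length : Int) (out : String) : Prop := out = generate_thermometer_alt cp cp_range length
instance (cp : Int) (cp_range : Int) (length : Int) (out : String) : Decidable (Spec_generate_thermometer cp cp_range length out) := by unfold Spec_generate_thermometer; infer_instance

-- ===== CLAIM (what is proved, stated in full; the proofs are below) =====
def Claim_equal_generate_thermometer : Prop := ∀ (cp : Int) (cp_range : Int) (length : Int), Dom_generate_thermometer cp cp_range length → Pre_generate_thermometer cp cp_range length → Spec_generate_thermometer cp cp_range length (generate_thermometer cp cp_range length)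

-- ===== LEMMAS AND PROOFS =====

-- the per-index loop of A accumulates the map of the marker test over the range
theorem pv_fold_bar (m : Int) (l : List Int) (s : String) :
    (l.foldl (fun b i => b ++ (if i = m then "█" else "-")) s).toList
      = s.toList ++ l.map (fun i => if i = m then '█' else '-') := by
  induction l generalizing s with
  | nil => simp
  | cons x xs ih =>
      simp only [List.foldl_cons, List.map_cons, ih]
      by_cases h : x = m <;> simp [h, String.toList_append]

-- the mapped marker test over List.range is exactly B's three segments
theorem pv_range_segments (m : Int) (n : Nat) :
    (List.range n).map (fun i : Nat => if (Int.ofNat i) = m then '█' else '-')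
      = if 0 ≤ m ∧ m < (n : Int) then
          List.replicate m.toNat '-' ++ '█' :: List.replicate (n - m.toNat - 1) '-'
        else List.replicate n '-' := by
  induction n with
  | zero =>
      have h : ¬ (0 ≤ m ∧ m < ((0 : Nat) : Int)) := by push_cast; omega
      rw [if_neg h]; rfl
  | succ k ih =>
      rw [List.range_succ, List.map_append, ih, List.map_cons, List.map_nil]
      by_cases hk : 0 ≤ m ∧ m < (k : Int)
      · have hk' : 0 ≤ m ∧ m < ((k + 1 : Nat) : Int) := by push_cast at hk ⊢; omega
        have hne : Int.ofNat k ≠ m := by simp only [Int.ofNat_eq_natCast]; omega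
        rw [if_pos hk, if_pos hk', if_neg hne]
        have h2 : k + 1 - m.toNat - 1 = (k - m.toNat - 1) + 1 := by omega
        rw [h2, List.replicate_succ']
        simp [List.append_assoc]
      · by_cases hm : Int.ofNat k = m
        · have hk' : 0 ≤ m ∧ m < ((k + 1 : Nat) : Int) := by
            simp only [Int.ofNat_eq_natCast] at hm; push_cast; omega
          have hmt : m.toNat = k := by simp only [Int.ofNat_eq_natCast] at hm; omega
          have h2 : k + 1 - m.toNat - 1 = 0 := by omega
          rw [if_neg hk, if_pos hk', if_pos hm, h2, hmt, List.replicate_zero]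
        · have hk' : ¬ (0 ≤ m ∧ m < ((k + 1 : Nat) : Int)) := by
            simp only [Int.ofNat_eq_natCast] at hm; push_cast at hk ⊢; omega
          rw [if_neg hk, if_neg hk', if_neg hm, ← List.replicate_succ']

-- the two ports agree for every marker and length (the shared marker computation is identical)
theorem pv_bar_eq (m L : Int) :
    ("[" ++ (PySem.List.pyRange 0 L 1).foldl (fun b i => b ++ (if i = m then "█" else "-")) "" ++ "]")
      = (if 0 ≤ m ∧ m < L then
          "[" ++ String.ofList (List.replicate m.toNat '-') ++ "█"
              ++ String.ofList (List.replicate (L - m - 1).toNat '-') ++ "]"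
        else "[" ++ String.ofList (List.replicate L.toNat '-') ++ "]") := by
  apply String.toList_injective
  rw [PySem.List.pyRange_one]
  have h0 : (L - 0).toNat = L.toNat := by omega
  rw [h0, String.toList_append, String.toList_append, pv_fold_bar, List.map_map]
  have hfun : ((fun i : Int => if i = m then '█' else '-') ∘ fun k : Nat => (0 : Int) + ↑k)
      = (fun i : Nat => if (Int.ofNat i) = m then '█' else '-') := by
    funext k; simp [Int.ofNat_eq_natCast]
  rw [hfun, pv_range_segments m L.toNat]
  by_cases h : 0 ≤ m ∧ m < L
  · have h' : 0 ≤ m ∧ m < ((L.toNat : Nat) : Int) := by constructor <;> omega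
    have ht : L.toNat - m.toNat - 1 = (L - m - 1).toNat := by omega
    rw [if_pos h, if_pos h', ht]
    simp [String.toList_append]
  · have h' : ¬ (0 ≤ m ∧ m < ((L.toNat : Nat) : Int)) := by
      intro hc; exact h ⟨hc.1, by omega⟩
    rw [if_neg h, if_neg h']
    simp [String.toList_append]

-- ===== VERDICT (by name: the statement is the Claim_ definition above) =====
theorem generate_thermometer_spec : Claim_equal_generate_thermometer := by
  intro cp cp_range length _ _
  unfold Spec_generate_thermometer generate_thermometer generate_thermometer_alt
  exact pv_bar_eq _ _
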